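-- pv_equiv track=rewrite | github.com/fenghaitao/opencode | python/opencode_python/tools/edit.py | _indentation_flexible_replacer
-- ===== SOURCE A (Python) =====
-- from typing import Generator, Optional
--
-- def _indentation_flexible_replacer(content: str, find: str) -> Generator[str, None, None]:
--     """Replacer that ignores leading whitespace differences."""
--     def remove_indentation(text: str) -> str:
--         lines = text.split('\n')
--         non_empty_lines = [line for line in lines if line.strip()]
--         if not non_empty_lines:
--             return text
--
--         min_indent = min(len(line) - len(line.lstrip()) for line in non_empty_lines)
--         return '\n'.join(line[min_indent:] if line.strip() else line for line in lines)
--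
--     normalized_find = remove_indentation(find)
--     content_lines = content.split('\n')
--     find_lines = find.split('\n')
--
--     for i in range(len(content_lines) - len(find_lines) + 1):
--         block = '\n'.join(content_lines[i:i + len(find_lines)])
--         if remove_indentation(block) == normalized_find:
--             yield block
-- ===== SOURCE B (Python) =====
-- from typing import Generator
--
-- def _indentation_flexible_replacer(content: str, find: str) -> Generator[str, None, None]:
--     """Anchor-and-verify search: index content lines by their dedent key once,
--     jump only to positions whose key matches find's first line, and verify each
--     candidate block by arithmetic indent offsets and a suffix test (no
--     per-window re-dedent / join / string comparison of whole blocks)."""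
--     content_lines = content.split('\n')
--     find_lines = find.split('\n')
--     n, m = len(content_lines), len(find_lines)
--
--     def key(line):
--         body = line.lstrip()
--         return (False, body) if body else (True, line)
--
--     ckey = [key(l) for l in content_lines]
--     cind = [len(l) - len(l.lstrip()) for l in content_lines]
--     fkey = [key(l) for l in find_lines]
--     find_ind = [len(l) - len(l.lstrip()) for l in find_lines]
--     fmin = min((find_ind[j] for j in range(m) if not fkey[j][0]), default=0)
--     ftail = [l[fmin:] for l in find_lines]
--
--     index = {}
--     for p, k in enumerate(ckey):
--         index.setdefault(k, []).append(p)
--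
--     for i in index.get(fkey[0], []):
--         if i + m > n:
--             continue
--         nbind = [cind[i + j] for j in range(m) if not ckey[i + j][0]]
--         cmin = min(nbind, default=0)
--         ok = all(
--             content_lines[i + j] == find_lines[j] if fkey[j][0]
--             else (ckey[i + j] == fkey[j]
--                   and cind[i + j] - cmin == find_ind[j] - fmin
--                   and content_lines[i + j].endswith(ftail[j]))
--             for j in range(m))
--         if ok:
--             yield '\n'.join(content_lines[i + j] for j in range(m))
-- ===== Notes on version B (the rewrite author's own statement) =====
-- stated objective: alternative
-- what changed: B replaces A's full sliding sweep (join each window, re-dedent it, compare strings) by an anchor-and-verify search: it indexes content lines by a dedent key once, jumps only to positions whose key matches find's first line, and verifies each candidate by arithmetic indent offsets plus a suffix test, never re-dedenting or joining a window for comparison.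
import Mathlib
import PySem

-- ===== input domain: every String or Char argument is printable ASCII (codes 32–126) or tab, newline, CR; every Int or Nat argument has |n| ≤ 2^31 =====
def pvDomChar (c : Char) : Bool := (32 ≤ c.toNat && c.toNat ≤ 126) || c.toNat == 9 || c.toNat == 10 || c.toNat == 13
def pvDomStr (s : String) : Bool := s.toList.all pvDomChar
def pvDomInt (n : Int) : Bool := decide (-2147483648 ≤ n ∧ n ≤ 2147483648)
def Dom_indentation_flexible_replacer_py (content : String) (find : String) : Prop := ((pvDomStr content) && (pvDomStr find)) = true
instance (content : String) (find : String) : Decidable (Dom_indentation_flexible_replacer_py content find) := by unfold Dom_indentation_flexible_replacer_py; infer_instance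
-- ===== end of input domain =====

-- B replaces A's sliding window sweep with re-dedent-and-compare by an
-- anchor-and-verify search (index content lines by dedent key, jump to
-- first-line anchors, verify by indent arithmetic and a suffix test);
-- objective: alternative decomposition of the same matching.

-- ===== PORT A =====
-- A's inner helper remove_indentation, transliterated.
def pvRemoveIndentation (text : List Char) : List Char :=
  let lines := PySem.Chars.splitOn text ['\n']
  let nonEmptyLines := lines.filter (fun line => !(PySem.Chars.strip line).isEmpty)
  if nonEmptyLines.isEmpty then text
  else
    let minIndent : Nat :=
      (PySem.List.min? (nonEmptyLines.map (fun line => line.length - (PySem.Chars.lstrip line).length)) (fun x => x)).getD 0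
    PySem.Chars.join ['\n']
      (lines.map (fun line =>
        if !(PySem.Chars.strip line).isEmpty then PySem.List.slice line (some (minIndent : Int)) none else line))

def indentation_flexible_replacer_py (content : String) (find : String) : List String :=
  let normalizedFind := pvRemoveIndentation find.toList
  let contentLines := PySem.Chars.splitOn content.toList ['\n']
  let findLines := PySem.Chars.splitOn find.toList ['\n']
  (PySem.List.pyRange 0 ((contentLines.length : Int) - (findLines.length : Int) + 1) 1).foldl
    (fun acc i =>
      let block := PySem.Chars.join ['\n']
        (PySem.List.slice contentLines (some i) (some (i + (findLines.length : Int))))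
      if pvRemoveIndentation block = normalizedFind then acc ++ [String.ofList block] else acc) []

-- ===== PORT B =====
def pvKeyB (line : List Char) : Bool × List Char :=
  let body := PySem.Chars.lstrip line
  if body.isEmpty then (true, line) else (false, body)

def pvIndent (line : List Char) : Nat := line.length - (PySem.Chars.lstrip line).length

-- fmin = min(find_ind[j] for j in range(m) if not fkey[j][0]) with default 0
def pvFminB (findLines : List (List Char)) : Nat :=
  (PySem.List.min? (((PySem.List.pyRange 0 (findLines.length : Int) 1).filter
      (fun j => !(PySem.List.pyGetD (findLines.map pvKeyB) j (true, [])).1)).map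
      (fun j => PySem.List.pyGetD (findLines.map pvIndent) j 0)) (fun x => x)).getD 0

-- cmin = min(nbind) with default 0, nbind the window's non-blank indents
def pvCminB (contentLines : List (List Char)) (m : Nat) (i : Int) : Nat :=
  (PySem.List.min? (((PySem.List.pyRange 0 (m : Int) 1).filter
      (fun j => !(PySem.List.pyGetD (contentLines.map pvKeyB) (i + j) (true, [])).1)).map
      (fun j => PySem.List.pyGetD (contentLines.map pvIndent) (i + j) 0)) (fun x => x)).getD 0

-- ok = all(...) : per-line verification of the candidate block at anchor i
def pvOkB (contentLines findLines : List (List Char)) (i : Int) : Bool :=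
  (PySem.List.pyRange 0 (findLines.length : Int) 1).all (fun j =>
    if (PySem.List.pyGetD (findLines.map pvKeyB) j (true, [])).1 then
      PySem.List.pyGetD contentLines (i + j) [] == PySem.List.pyGetD findLines j []
    else
      (PySem.List.pyGetD (contentLines.map pvKeyB) (i + j) (true, [])
          == PySem.List.pyGetD (findLines.map pvKeyB) j (true, []))
      && (Int.ofNat (PySem.List.pyGetD (contentLines.map pvIndent) (i + j) 0)
            - Int.ofNat (pvCminB contentLines findLines.length i)
          == Int.ofNat (PySem.List.pyGetD (findLines.map pvIndent) j 0)
            - Int.ofNat (pvFminB findLines))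
      && PySem.Chars.endswith (PySem.List.pyGetD contentLines (i + j) [])
           (PySem.List.pyGetD (findLines.map (fun l => l.drop (pvFminB findLines))) j []))

-- '\n'.join(content_lines[i + j] for j in range(m))
def pvEmitB (contentLines : List (List Char)) (m : Nat) (i : Int) : String :=
  String.ofList (PySem.Chars.join ['\n'] ((PySem.List.pyRange 0 (m : Int) 1).map
    (fun j => PySem.List.pyGetD contentLines (i + j) [])))

-- index.setdefault(k, []).append(p) over enumerate(ckey)
def pvIndexB (ckey : List (Bool × List Char)) : PySem.Dict (Bool × List Char) (List Int) :=
  (PySem.List.enumerate ckey 0).foldl (fun d e => d.modify e.2 [] (fun b => b ++ [e.1])) PySem.Dict.empty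

def indentation_flexible_replacer_py_alt (content : String) (find : String) : List String :=
  let contentLines := PySem.Chars.splitOn content.toList ['\n']
  let findLines := PySem.Chars.splitOn find.toList ['\n']
  ((pvIndexB (contentLines.map pvKeyB)).getD
      (PySem.List.pyGetD (findLines.map pvKeyB) 0 (true, [])) []).foldl
    (fun acc i =>
      if i + (findLines.length : Int) > (contentLines.length : Int) then acc
      else if pvOkB contentLines findLines i then
        acc ++ [pvEmitB contentLines findLines.length i]
      else acc) []

-- ===== PRECONDITION & SPEC =====
def Spec_indentation_flexible_replacer_py (content : String) (find : String) (out : List String) : Prop := out = indentation_flexible_replacer_py_alt content find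
instance (content : String) (find : String) (out : List String) : Decidable (Spec_indentation_flexible_replacer_py content find out) := by unfold Spec_indentation_flexible_replacer_py; infer_instance

-- ===== CLAIM (what is proved, stated in full; the proofs are below) =====
def Claim_equal_indentation_flexible_replacer_py : Prop := ∀ (content : String) (find : String), Dom_indentation_flexible_replacer_py content find → Spec_indentation_flexible_replacer_py content find (indentation_flexible_replacer_py content find)

-- ===== LEMMAS AND PROOFS =====


-- A simple structural model of str.split('\n').
def pvSplit (pre : List Char) : List Char → List (List Char)
  | [] => [pre]
  | c :: rest => if c = '\n' then pre :: pvSplit [] rest else pvSplit (pre ++ [c]) rest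

theorem pvSplit_go : ∀ (fuel : Nat) (l cur : List Char) (acc : List (List Char)),
    l.length < fuel →
    PySem.Chars.splitOn.go ['\n'] fuel l cur acc = acc.reverse ++ pvSplit cur.reverse l := by
  intro fuel
  induction fuel with
  | zero => intro l cur acc h; omega
  | succ n ih =>
    intro l cur acc h
    cases l with
    | nil => simp [PySem.Chars.splitOn.go, pvSplit]
    | cons c rest =>
      rw [PySem.Chars.splitOn.go]
      by_cases hc : c = '\n'
      · subst hc
        simp only [List.isPrefixOf, BEq.rfl, Bool.true_and, if_pos]
        rw [ih _ _ _ (by simpa using Nat.lt_of_succ_lt_succ h)]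
        simp [pvSplit]
      · have : (['\n'].isPrefixOf (c :: rest)) = false := by
          simp [List.isPrefixOf]
          intro hcc; exact absurd hcc.symm hc
        rw [this]
        simp only [Bool.false_eq_true, if_neg, not_false_iff]
        rw [ih _ _ _ (by simpa using Nat.lt_of_succ_lt_succ h)]
        simp [pvSplit, hc]

theorem splitOn_eq_pvSplit (s : List Char) :
    PySem.Chars.splitOn s ['\n'] = pvSplit [] s := by
  rw [PySem.Chars.splitOn, pvSplit_go (s.length + 1) s [] [] (by omega)]
  rfl

theorem pvSplit_eq_splitOn (pre l : List Char) :
    pvSplit pre l = (List.splitOn '\n' l).modifyHead (pre ++ ·) := by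
  induction l generalizing pre with
  | nil => simp [pvSplit, List.splitOn, List.splitOnP, List.splitOnP.go]
  | cons c rest ih =>
    rw [pvSplit]
    by_cases hc : c = '\n'
    · subst hc
      simp only [List.splitOn, List.splitOnP_cons, BEq.rfl, if_pos, ih]
      have hne : List.splitOnP (fun x => x == '\n') rest ≠ [] := List.splitOnP_ne_nil _ _
      cases h : List.splitOnP (fun x => x == '\n') rest with
      | nil => exact absurd h hne
      | cons a t => simp [List.modifyHead]
    · simp only [List.splitOn] at *
      rw [List.splitOnP_cons]
      simp only [beq_iff_eq, hc, if_false]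
      rw [ih]
      have hne : List.splitOnP (· == '\n') rest ≠ [] := List.splitOnP_ne_nil _ _
      cases h : List.splitOnP (· == '\n') rest with
      | nil => exact absurd h hne
      | cons a t => simp [List.modifyHead]

theorem pvSplit_ne_nil (pre l : List Char) : pvSplit pre l ≠ [] := by
  induction l generalizing pre with
  | nil => simp [pvSplit]
  | cons c rest ih =>
    rw [pvSplit]
    by_cases hc : c = '\n' <;> simp [hc, ih]

theorem mem_pvSplit_no_nl (pre l : List Char) (hpre : '\n' ∉ pre) :
    ∀ p ∈ pvSplit pre l, '\n' ∉ p := by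
  induction l generalizing pre with
  | nil => simpa [pvSplit] using hpre
  | cons c rest ih =>
    rw [pvSplit]
    by_cases hc : c = '\n'
    · simp only [hc]
      intro p hp
      rcases List.mem_cons.1 hp with h | h
      · subst h; exact hpre
      · exact ih [] (by simp) p h
    · rw [if_neg hc]
      exact ih (pre ++ [c]) (by simp [hpre, Ne.symm hc])

theorem join_pvSplit (s : List Char) :
    PySem.Chars.join ['\n'] (pvSplit [] s) = s := by
  rw [pvSplit_eq_splitOn]
  have : (List.splitOn '\n' s).modifyHead (fun x => [] ++ x) = List.splitOn '\n' s := by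
    cases List.splitOn '\n' s <;> simp [List.modifyHead]
  rw [this, PySem.Chars.join, List.intercalate_splitOn]

theorem pvSplit_join (parts : List (List Char)) (hne : parts ≠ [])
    (hnl : ∀ p ∈ parts, '\n' ∉ p) :
    pvSplit [] (PySem.Chars.join ['\n'] parts) = parts := by
  rw [pvSplit_eq_splitOn, PySem.Chars.join]
  rw [List.splitOn_intercalate parts '\n' hnl hne]
  cases parts <;> simp [List.modifyHead]

theorem pvJoin_inj (a b : List (List Char)) (ha : a ≠ []) (hb : b ≠ [])
    (hna : ∀ p ∈ a, '\n' ∉ p) (hnb : ∀ p ∈ b, '\n' ∉ p)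
    (h : PySem.Chars.join ['\n'] a = PySem.Chars.join ['\n'] b) : a = b := by
  rw [← pvSplit_join a ha hna, ← pvSplit_join b hb hnb, h]

def pvBlank (line : List Char) : Bool := (PySem.Chars.strip line).isEmpty

theorem pvBlank_iff (l : List Char) :
    pvBlank l = true ↔ ∀ c ∈ l, PySem.Chars.isspace c = true := by
  unfold pvBlank PySem.Chars.strip PySem.Chars.rstrip PySem.Chars.lstrip
  rw [List.isEmpty_iff, List.reverse_eq_nil_iff, List.dropWhile_eq_nil_iff]
  constructor
  · intro h c hc
    rw [← List.takeWhile_append_dropWhile (p := PySem.Chars.isspace) (l := l)] at hc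
    rcases List.mem_append.1 hc with h' | h'
    · exact List.mem_takeWhile_imp h'
    · exact h c (by simpa using h')
  · intro h c hc
    exact h c ((List.dropWhile_sublist (p := PySem.Chars.isspace)).mem (List.mem_reverse.1 hc))

def pvCut (k : Nat) (l : List Char) : List Char := if pvBlank l then l else l.drop k

def pvCMin (ls : List (List Char)) : Nat :=
  (PySem.List.min? ((ls.filter (fun l => !pvBlank l)).map pvIndent) (fun x => x)).getD 0

theorem pvIndent_eq (l : List Char) :
    pvIndent l = (l.takeWhile PySem.Chars.isspace).length := by
  unfold pvIndent PySem.Chars.lstrip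
  have := congrArg List.length (List.takeWhile_append_dropWhile (p := PySem.Chars.isspace) (l := l))
  simp only [List.length_append] at this
  omega

theorem pvBlank_drop_false (l : List Char) (k : Nat) (h : pvBlank l = false)
    (hk : k ≤ pvIndent l) : pvBlank (l.drop k) = false := by
  have hdw : l.dropWhile PySem.Chars.isspace ≠ [] := by
    intro hnil
    rw [List.dropWhile_eq_nil_iff] at hnil
    rw [(pvBlank_iff l).2 hnil] at h
    exact absurd h (by simp)
  have hhead : PySem.Chars.isspace ((l.dropWhile PySem.Chars.isspace).head hdw) = false :=
    Bool.not_eq_true _ ▸ (by simpa using List.head_dropWhile_not PySem.Chars.isspace hdw)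
  have hsplit : l.drop k = (l.takeWhile PySem.Chars.isspace).drop k ++ l.dropWhile PySem.Chars.isspace := by
    conv_lhs => rw [← List.takeWhile_append_dropWhile (p := PySem.Chars.isspace) (l := l)]
    rw [List.drop_append]
    rw [pvIndent_eq] at hk
    have : k - (l.takeWhile PySem.Chars.isspace).length = 0 := by omega
    rw [this, List.drop_zero]
  rw [← Bool.not_eq_true]
  intro hb
  rw [pvBlank_iff] at hb
  have hmem : (l.dropWhile PySem.Chars.isspace).head hdw ∈ l.drop k := by
    rw [hsplit]
    exact List.mem_append_right _ (List.head_mem hdw)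
  rw [hb _ hmem] at hhead
  exact absurd hhead (by simp)

theorem pvCMin_le (ls : List (List Char)) (c : List Char) (hc : c ∈ ls)
    (hb : pvBlank c = false) : pvCMin ls ≤ pvIndent c := by
  have hmem : pvIndent c ∈ (ls.filter (fun l => !pvBlank l)).map pvIndent :=
    List.mem_map_of_mem (List.mem_filter.2 ⟨hc, by simp [hb]⟩)
  unfold pvCMin
  cases hmin : PySem.List.min? ((ls.filter (fun l => !pvBlank l)).map pvIndent) (fun x => x) with
  | none =>
    rw [PySem.List.min?_eq_none_iff] at hmin
    rw [hmin] at hmem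
    simp at hmem
  | some v =>
    simpa using PySem.List.min?_isMin hmin _ hmem

theorem pvRemoveIndentation_eq (s : List Char) :
    pvRemoveIndentation s =
      PySem.Chars.join ['\n']
        ((PySem.Chars.splitOn s ['\n']).map (pvCut (pvCMin (PySem.Chars.splitOn s ['\n'])))) := by
  unfold pvRemoveIndentation
  by_cases hempty :
      ((PySem.Chars.splitOn s ['\n']).filter (fun line => !(PySem.Chars.strip line).isEmpty)).isEmpty = true
  · simp only [hempty, if_pos]
    have hall : ∀ l ∈ PySem.Chars.splitOn s ['\n'], pvBlank l = true := by
      intro l hl'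
      by_contra hb
      have hmem : l ∈ (PySem.Chars.splitOn s ['\n']).filter (fun line => !(PySem.Chars.strip line).isEmpty) :=
        List.mem_filter.2 ⟨hl', by simp only [pvBlank] at hb; simp [hb]⟩
      rw [List.isEmpty_iff] at hempty
      rw [hempty] at hmem
      simp at hmem
    have hmap : (PySem.Chars.splitOn s ['\n']).map (pvCut (pvCMin (PySem.Chars.splitOn s ['\n'])))
        = PySem.Chars.splitOn s ['\n'] := by
      rw [List.map_congr_left (g := id) (fun x hx => by simp [pvCut, hall x hx]), List.map_id]
    rw [hmap, splitOn_eq_pvSplit, join_pvSplit]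
  · simp only [hempty, if_neg, Bool.false_eq_true, not_false_iff]
    congr 1
    apply List.map_congr_left
    intro line _
    simp only [pvCut, pvCMin, pvBlank]
    by_cases hb : (PySem.Chars.strip line).isEmpty = true
    · simp [hb]
    · simp only [hb, Bool.not_false, if_true, Bool.false_eq_true, if_false]
      rw [PySem.List.slice_from_natCast]
      rfl

theorem pv_no_nl_cut (k : Nat) (l : List Char) (h : '\n' ∉ l) : '\n' ∉ pvCut k l := by
  unfold pvCut
  split
  · exact h
  · exact fun hm => h ((List.drop_sublist k l).subset hm)


theorem pvBlank_eq_lstrip (l : List Char) :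
    pvBlank l = (PySem.Chars.lstrip l).isEmpty := by
  have h2 : (PySem.Chars.lstrip l).isEmpty = true ↔ ∀ c ∈ l, PySem.Chars.isspace c = true := by
    unfold PySem.Chars.lstrip
    rw [List.isEmpty_iff, List.dropWhile_eq_nil_iff]
  rw [Bool.eq_iff_iff, pvBlank_iff, h2]

theorem pvKeyB_fst (l : List Char) : (pvKeyB l).1 = pvBlank l := by
  rw [pvBlank_eq_lstrip]
  unfold pvKeyB
  by_cases h : (PySem.Chars.lstrip l).isEmpty = true <;> simp [h]

theorem pvKeyB_nonblank (l : List Char) (h : pvBlank l = false) :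
    pvKeyB l = (false, PySem.Chars.lstrip l) := by
  rw [pvBlank_eq_lstrip] at h
  unfold pvKeyB
  simp [h]

theorem pvKeyB_blank (l : List Char) (h : pvBlank l = true) :
    pvKeyB l = (true, l) := by
  rw [pvBlank_eq_lstrip] at h
  unfold pvKeyB
  simp [h]

theorem pvLstrip_len_le (l : List Char) : (PySem.Chars.lstrip l).length ≤ l.length := by
  unfold PySem.Chars.lstrip
  exact (List.dropWhile_sublist _).length_le

theorem pvLen_decomp (l : List Char) : l.length = pvIndent l + (PySem.Chars.lstrip l).length := by
  have := pvLstrip_len_le l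
  unfold pvIndent
  omega

theorem pvIndent_le_length (l : List Char) : pvIndent l ≤ l.length := by
  unfold pvIndent; omega

theorem pvLstrip_drop (l : List Char) (k : Nat) (hk : k ≤ pvIndent l) :
    PySem.Chars.lstrip (l.drop k) = PySem.Chars.lstrip l := by
  rw [pvIndent_eq] at hk
  unfold PySem.Chars.lstrip
  have hsplit : l.drop k = (l.takeWhile PySem.Chars.isspace).drop k ++ l.dropWhile PySem.Chars.isspace := by
    conv_lhs => rw [← List.takeWhile_append_dropWhile (p := PySem.Chars.isspace) (l := l)]
    rw [List.drop_append]
    have : k - (l.takeWhile PySem.Chars.isspace).length = 0 := by omega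
    rw [this, List.drop_zero]
  have hdw : ∀ (t : List Char) (hall : ∀ x ∈ t, PySem.Chars.isspace x = true),
      (t ++ l.dropWhile PySem.Chars.isspace).dropWhile PySem.Chars.isspace
        = (l.dropWhile PySem.Chars.isspace).dropWhile PySem.Chars.isspace := by
    intro t hall
    rw [List.dropWhile_append, List.dropWhile_eq_nil_iff.2 hall]
    simp
  have hidem : (l.dropWhile PySem.Chars.isspace).dropWhile PySem.Chars.isspace
      = l.dropWhile PySem.Chars.isspace := by
    cases hde : l.dropWhile PySem.Chars.isspace with
    | nil => simp
    | cons x xs =>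
      have hne : l.dropWhile PySem.Chars.isspace ≠ [] := by simp [hde]
      have hx : PySem.Chars.isspace x = false := by
        have h0 := List.head_dropWhile_not PySem.Chars.isspace hne
        simpa [hde] using h0
      rw [List.dropWhile_cons, hx]
      simp
  rw [hsplit, hdw _ (fun x hx => List.mem_takeWhile_imp ((List.drop_sublist _ _).mem hx)), hidem]

theorem pvIndent_drop (l : List Char) (k : Nat) (hk : k ≤ pvIndent l) :
    pvIndent (l.drop k) = pvIndent l - k := by
  have h1 := pvLen_decomp l
  have h2 := pvLen_decomp (l.drop k)
  rw [pvLstrip_drop l k hk, List.length_drop] at h2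
  have := pvIndent_le_length l
  omega

def pvCheck (cm fm : Nat) (c f : List Char) : Bool :=
  if pvBlank f then c == f
  else (pvKeyB c == pvKeyB f)
    && (((pvIndent c : Int) - (cm : Int)) == ((pvIndent f : Int) - (fm : Int)))
    && PySem.Chars.endswith c (f.drop fm)

theorem pvCheck_key (cm fm : Nat) (c f : List Char) (h : pvCheck cm fm c f = true) :
    pvKeyB c = pvKeyB f := by
  unfold pvCheck at h
  by_cases hbf : pvBlank f = true
  · rw [if_pos hbf, beq_iff_eq] at h
    rw [h]
  · rw [if_neg hbf] at h
    simp only [Bool.and_eq_true, beq_iff_eq] at h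
    exact h.1.1

theorem pv_cut_iff_check (c f : List Char) (cm fm : Nat)
    (hc : pvBlank c = false → cm ≤ pvIndent c)
    (hf : pvBlank f = false → fm ≤ pvIndent f) :
    pvCut cm c = pvCut fm f ↔ pvCheck cm fm c f = true := by
  unfold pvCut pvCheck
  by_cases hbf : pvBlank f = true <;> by_cases hbc : pvBlank c = true
  · simp [hbf, hbc]
  · -- f blank, c non-blank
    rw [Bool.not_eq_true] at hbc
    simp only [hbf, hbc, if_pos, Bool.false_eq_true, if_neg, not_false_iff, beq_iff_eq]
    have hcd : pvBlank (c.drop cm) = false := pvBlank_drop_false c cm hbc (hc hbc)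
    constructor
    · intro h; rw [h] at hcd; rw [hcd] at hbf; exact absurd hbf (by simp)
    · intro h; rw [h] at hbc; rw [hbc] at hbf; exact absurd hbf (by simp)
  · -- f non-blank, c blank
    rw [Bool.not_eq_true] at hbf
    simp only [hbf, hbc, if_pos, Bool.false_eq_true, if_neg, not_false_iff]
    have hfd : pvBlank (f.drop fm) = false := pvBlank_drop_false f fm hbf (hf hbf)
    have hkey : (pvKeyB c == pvKeyB f) = false := by
      rw [pvKeyB_blank c hbc, pvKeyB_nonblank f hbf]
      simp
    rw [hkey]
    simp only [Bool.false_and, Bool.false_eq_true, iff_false]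
    intro h
    rw [← h] at hfd
    rw [hbc] at hfd
    exact absurd hfd (by simp)
  · -- both non-blank
    rw [Bool.not_eq_true] at hbf hbc
    simp only [hbf, hbc, Bool.false_eq_true, if_neg, not_false_iff]
    have hcm := hc hbc
    have hfm := hf hbf
    constructor
    · intro h
      have hls : PySem.Chars.lstrip c = PySem.Chars.lstrip f := by
        rw [← pvLstrip_drop c cm hcm, ← pvLstrip_drop f fm hfm, h]
      have hkey : pvKeyB c = pvKeyB f := by
        rw [pvKeyB_nonblank c hbc, pvKeyB_nonblank f hbf, hls]
      have hic : pvIndent c - cm = pvIndent f - fm := by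
        rw [← pvIndent_drop c cm hcm, ← pvIndent_drop f fm hfm, h]
      have hint : ((pvIndent c : Int) - (cm : Int)) = ((pvIndent f : Int) - (fm : Int)) := by
        omega
      have hend : PySem.Chars.endswith c (f.drop fm) = true := by
        rw [PySem.Chars.endswith_iff, ← h]
        exact List.drop_suffix cm c
      simp [hkey, hint, hend]
    · intro h
      simp only [Bool.and_eq_true, beq_iff_eq] at h
      obtain ⟨⟨hkey, hint⟩, hend⟩ := h
      rw [pvKeyB_nonblank c hbc, pvKeyB_nonblank f hbf] at hkey
      have hls : PySem.Chars.lstrip c = PySem.Chars.lstrip f := by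
        exact congrArg Prod.snd hkey
      have hsuf := (PySem.Chars.endswith_iff _ _).1 hend
      have heq := List.suffix_iff_eq_drop.1 hsuf
      have hlc := pvLen_decomp c
      have hlf := pvLen_decomp f
      have hlen : (PySem.Chars.lstrip c).length = (PySem.Chars.lstrip f).length := by rw [hls]
      have hdl : (f.drop fm).length = f.length - fm := by simp
      have hfl : fm ≤ f.length := le_trans hfm (pvIndent_le_length f)
      have hcl : c.length - (f.drop fm).length = cm := by omega
      rw [hcl] at heq
      exact heq.symm


theorem pv_range_filter_map {α β : Type} (w : List α) (d : α) (p : α → Bool) (f : α → β) :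
    ((List.range w.length).filter (fun j => p (w.getD j d))).map (fun j => f (w.getD j d))
      = (w.filter p).map f := by
  induction w with
  | nil => simp
  | cons x w ih =>
    rw [List.length_cons, List.range_succ_eq_map]
    rw [List.filter_cons]
    by_cases hx : p x = true
    · simp only [List.getD_cons_zero, hx, if_pos]
      rw [List.map_cons, List.filter_map, List.map_map]
      simp only [Function.comp_def, List.getD_cons_succ]
      rw [List.filter_cons_of_pos (by simpa using hx), List.map_cons]
      congr 1
    · simp only [List.getD_cons_zero, hx, Bool.false_eq_true, if_neg, not_false_iff]
      rw [List.filter_map, List.map_map]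
      simp only [Function.comp_def, List.getD_cons_succ]
      rw [List.filter_cons_of_neg (by simpa using hx)]
      exact ih

theorem pv_range_map_window {α : Type} (xs : List α) (a k : Nat) (d : α) (h : a + k ≤ xs.length) :
    (List.range k).map (fun j => xs.getD (a + j) d) = (xs.drop a).take k := by
  apply List.ext_getElem
  · simp only [List.length_map, List.length_range, List.length_take, List.length_drop]
    omega
  · intro j h1 h2
    simp only [List.length_map, List.length_range] at h1
    simp only [List.getElem_map, List.getElem_range, List.getElem_take, List.getElem_drop]
    exact List.getD_eq_getElem xs d (by omega)

theorem pv_index_getD {κ : Type} [BEq κ] [LawfulBEq κ] (l : List (Int × κ)) (k : κ) :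
    ((l.foldl (fun d e => d.modify e.2 [] (fun b => b ++ [e.1])) PySem.Dict.empty).getD k [])
      = (l.filter (fun e => e.2 == k)).map (·.1) := by
  have hfold : l.foldl (fun d e => d.modify e.2 [] (fun b => b ++ [e.1])) PySem.Dict.empty
      = (l.map Prod.swap).foldl (fun d p => d.modify p.1 [] (fun b => b ++ [p.2])) PySem.Dict.empty := by
    rw [List.foldl_map]
    rfl
  rw [hfold, PySem.Dict.getD_foldl_modify_append]
  rw [List.filter_map, List.map_map]
  simp [Function.comp_def, PySem.Dict.getD_empty]

theorem pv_filter_range_window (n m : Nat) (hm : 1 ≤ m) :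
    PySem.List.pyRange 0 ((n : Int) - (m : Int) + 1) 1
      = ((List.range n).filter (fun k => decide (k + m ≤ n))).map Int.ofNat := by
  by_cases hmn : m ≤ n
  · have hcast : (n : Int) - (m : Int) + 1 = ((n - m + 1 : Nat) : Int) := by omega
    rw [hcast, PySem.List.pyRange_zero_nat]
    have h1 : (List.range (n - m + 1)).filter (fun k => decide (k + m ≤ n)) = List.range (n - m + 1) := by
      apply List.filter_eq_self.2
      intro k hk
      rw [List.mem_range] at hk
      simp only [decide_eq_true_eq]
      omega
    have h2 : ((List.range (m - 1)).map (fun j => n - m + 1 + j)).filter (fun k => decide (k + m ≤ n)) = [] := by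
      apply List.filter_eq_nil_iff.2
      intro k hk
      obtain ⟨j, hj, rfl⟩ := List.mem_map.1 hk
      rw [List.mem_range] at hj
      simp only [decide_eq_true_eq]
      omega
    have hfil : (List.range n).filter (fun k => decide (k + m ≤ n)) = List.range (n - m + 1) := by
      have hr : List.range n = List.range (n - m + 1) ++ (List.range (m - 1)).map (fun j => n - m + 1 + j) := by
        rw [← List.range_add]
        congr 1
        omega
      rw [hr, List.filter_append, h1, h2, List.append_nil]
    rw [hfil]
    simp [Int.ofNat_eq_natCast]
  · rw [PySem.List.pyRange_one_eq_nil (by omega)]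
    have h2 : (List.range n).filter (fun k => decide (k + m ≤ n)) = [] := by
      apply List.filter_eq_nil_iff.2
      intro k hk
      rw [List.mem_range] at hk
      simp only [decide_eq_true_eq]
      omega
    rw [h2, List.map_nil]


theorem pv_nbind (xs : List (List Char)) (a m : Nat) (h : a + m ≤ xs.length) :
    ((List.range m).filter (fun j => !((xs.map pvKeyB).getD (a + j) (true, ([] : List Char))).1)).map
        (fun j => (xs.map pvIndent).getD (a + j) 0)
      = (((xs.drop a).take m).filter (fun l => !pvBlank l)).map pvIndent := by
  have hw : ((xs.drop a).take m).length = m := by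
    simp only [List.length_take, List.length_drop]
    omega
  have hbase := pv_range_filter_map ((xs.drop a).take m) [] (fun l => !pvBlank l) pvIndent
  rw [hw] at hbase
  rw [← hbase]
  have hget : ∀ j (hj : j < m), ((xs.drop a).take m).getD j ([] : List Char) = xs[a + j]'(by omega) := by
    intro j hj
    rw [List.getD_eq_getElem _ _ (by rw [hw]; exact hj : j < ((xs.drop a).take m).length)]
    simp [List.getElem_take, List.getElem_drop]
  have hpred : ∀ j ∈ List.range m,
      (!((xs.map pvKeyB).getD (a + j) (true, ([] : List Char))).1)
        = (!pvBlank (((xs.drop a).take m).getD j ([] : List Char))) := by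
    intro j hj
    rw [List.mem_range] at hj
    rw [hget j hj, List.getD_eq_getElem _ _ (by simp; omega : a + j < (xs.map pvKeyB).length)]
    simp only [List.getElem_map]
    rw [pvKeyB_fst]
  rw [List.filter_congr hpred]
  apply List.map_congr_left
  intro j hj
  have hjm : j < m := List.mem_range.1 (List.mem_of_mem_filter hj)
  rw [hget j hjm, List.getD_eq_getElem _ _ (by simp; omega : a + j < (xs.map pvIndent).length)]
  simp only [List.getElem_map]

theorem pv_window_main (cl fl : List (List Char)) (k : Nat)
    (hm : 0 < fl.length) (hk : k + fl.length ≤ cl.length)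
    (hclnl : ∀ p ∈ cl, '\n' ∉ p) (hflnl : ∀ p ∈ fl, '\n' ∉ p) :
    (PySem.Chars.join ['\n'] (((cl.drop k).take fl.length).map (pvCut (pvCMin ((cl.drop k).take fl.length))))
        = PySem.Chars.join ['\n'] (fl.map (pvCut (pvCMin fl))))
      ↔ (pvKeyB (cl.getD k []) = pvKeyB (fl.getD 0 []) ∧
         ∀ j < fl.length, pvCheck (pvCMin ((cl.drop k).take fl.length)) (pvCMin fl)
             (cl.getD (k + j) []) (fl.getD j []) = true) := by
  set m := fl.length with hmdef
  set w := (cl.drop k).take m with hwdef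
  have hwlen : w.length = m := by
    rw [hwdef]
    simp only [List.length_take, List.length_drop]
    omega
  have hwne : w ≠ [] := by
    intro hnil
    rw [hnil] at hwlen
    simp at hwlen
    omega
  have hflne : fl ≠ [] := List.ne_nil_of_length_pos hm
  have hwnl : ∀ p ∈ w, '\n' ∉ p := by
    intro p hp
    exact hclnl p (((List.take_sublist _ _).trans (List.drop_sublist _ _)).subset hp)
  have hwget : ∀ j, j < m → w.getD j ([] : List Char) = cl.getD (k + j) [] := by
    intro j hj
    rw [List.getD_eq_getElem _ _ (by omega : j < w.length),
        List.getD_eq_getElem _ _ (by omega : k + j < cl.length)]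
    simp [hwdef, List.getElem_take, List.getElem_drop]
  have hiff1 : (PySem.Chars.join ['\n'] (w.map (pvCut (pvCMin w)))
      = PySem.Chars.join ['\n'] (fl.map (pvCut (pvCMin fl)))) ↔
      w.map (pvCut (pvCMin w)) = fl.map (pvCut (pvCMin fl)) := by
    constructor
    · intro h
      exact pvJoin_inj _ _ (by simpa using hwne) (by simpa using hflne)
        (by intro p hp; obtain ⟨l, hl, rfl⟩ := List.mem_map.1 hp; exact pv_no_nl_cut _ l (hwnl l hl))
        (by intro p hp; obtain ⟨l, hl, rfl⟩ := List.mem_map.1 hp; exact pv_no_nl_cut _ l (hflnl l hl))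
        h
    · intro h
      rw [h]
  have hiff2 : (w.map (pvCut (pvCMin w)) = fl.map (pvCut (pvCMin fl))) ↔
      (∀ j < m, pvCut (pvCMin w) (w.getD j []) = pvCut (pvCMin fl) (fl.getD j [])) := by
    constructor
    · intro h j hj
      rw [List.getD_eq_getElem _ _ (by omega : j < w.length),
          List.getD_eq_getElem _ _ (by omega : j < fl.length)]
      have h1 : (w.map (pvCut (pvCMin w)))[j]? = (fl.map (pvCut (pvCMin fl)))[j]? := by rw [h]
      rw [List.getElem?_map, List.getElem?_map,
          List.getElem?_eq_getElem (by omega : j < w.length),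
          List.getElem?_eq_getElem (by omega : j < fl.length)] at h1
      simpa using h1
    · intro h
      apply List.ext_getElem
      · rw [List.length_map, List.length_map, hwlen]
      · intro j h1 h2
        have hj : j < m := by simp [hwlen] at h1; omega
        have := h j hj
        rw [List.getD_eq_getElem _ _ (by omega : j < w.length),
            List.getD_eq_getElem _ _ (by omega : j < fl.length)] at this
        simpa using this
  have hiff3 : (∀ j < m, pvCut (pvCMin w) (w.getD j []) = pvCut (pvCMin fl) (fl.getD j [])) ↔
      (∀ j < m, pvCheck (pvCMin w) (pvCMin fl) (w.getD j []) (fl.getD j []) = true) := by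
    constructor <;> intro h j hj <;>
    · have hc : pvBlank (w.getD j []) = false → pvCMin w ≤ pvIndent (w.getD j []) := by
        intro hb
        exact pvCMin_le w _ (by
          rw [List.getD_eq_getElem _ _ (by omega : j < w.length)]
          exact List.getElem_mem _) hb
      have hf : pvBlank (fl.getD j []) = false → pvCMin fl ≤ pvIndent (fl.getD j []) := by
        intro hb
        exact pvCMin_le fl _ (by
          rw [List.getD_eq_getElem _ _ (by omega : j < fl.length)]
          exact List.getElem_mem _) hb
      first
      | exact (pv_cut_iff_check _ _ _ _ hc hf).1 (h j hj)
      | exact (pv_cut_iff_check _ _ _ _ hc hf).2 (h j hj)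
  rw [hiff1, hiff2, hiff3]
  constructor
  · intro h
    refine ⟨?_, ?_⟩
    · have h0 := h 0 (by omega)
      have := pvCheck_key _ _ _ _ h0
      rw [hwget 0 (by omega)] at this
      simpa using this
    · intro j hj
      have := h j hj
      rw [hwget j hj] at this
      exact this
  · intro h j hj
    have := h.2 j hj
    rw [hwget j hj]
    exact this

theorem pv_getD_map {α β : Type} (f : α → β) (xs : List α) (i : Nat) (d : α) (d' : β)
    (h : i < xs.length) :
    (xs.map f).getD i d' = f (xs.getD i d) := by
  rw [List.getD_eq_getElem _ _ (by simpa using h), List.getD_eq_getElem _ _ h, List.getElem_map]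


theorem pv_fminB_eq (fl : List (List Char)) : pvFminB fl = pvCMin fl := by
  unfold pvFminB
  have hnb := pv_nbind fl 0 fl.length (by omega)
  simp only [Nat.zero_add, List.drop_zero, List.take_length] at hnb
  rw [PySem.List.pyRange_zero_nat, List.filter_map, List.map_map]
  simp only [Function.comp_def, PySem.List.pyGetD_natCast]
  rw [hnb]
  rfl

theorem pv_cminB_eq (cl : List (List Char)) (m k : Nat) (hk : k + m ≤ cl.length) :
    pvCminB cl m (k : Int) = pvCMin ((cl.drop k).take m) := by
  unfold pvCminB
  rw [PySem.List.pyRange_zero_nat, List.filter_map, List.map_map]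
  simp only [Function.comp_def, ← Nat.cast_add, PySem.List.pyGetD_natCast]
  rw [pv_nbind cl k m hk]
  rfl

theorem pv_emitB_eq (cl : List (List Char)) (m k : Nat) (hk : k + m ≤ cl.length) :
    pvEmitB cl m (k : Int) = String.ofList (PySem.Chars.join ['\n'] ((cl.drop k).take m)) := by
  unfold pvEmitB
  rw [PySem.List.pyRange_zero_nat, List.map_map]
  simp only [Function.comp_def, ← Nat.cast_add, PySem.List.pyGetD_natCast]
  rw [pv_range_map_window cl k m [] hk]

theorem pv_okB_eq (cl fl : List (List Char)) (k : Nat) (hk : k + fl.length ≤ cl.length) :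
    pvOkB cl fl (k : Int)
      = (List.range fl.length).all (fun j =>
          pvCheck (pvCMin ((cl.drop k).take fl.length)) (pvCMin fl)
            (cl.getD (k + j) []) (fl.getD j [])) := by
  unfold pvOkB
  rw [PySem.List.pyRange_zero_nat, List.all_map]
  simp only [Function.comp_def, ← Nat.cast_add, PySem.List.pyGetD_natCast,
    pv_fminB_eq, pv_cminB_eq cl fl.length k hk]
  have hpt : ∀ j ∈ List.range fl.length,
      (if ((fl.map pvKeyB).getD j (true, [])).1 = true then
          cl.getD (k + j) ([] : List Char) == fl.getD j []
        else
          ((cl.map pvKeyB).getD (k + j) (true, []) == (fl.map pvKeyB).getD j (true, []))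
          && (Int.ofNat ((cl.map pvIndent).getD (k + j) 0)
                - Int.ofNat (pvCMin ((cl.drop k).take fl.length))
              == Int.ofNat ((fl.map pvIndent).getD j 0) - Int.ofNat (pvCMin fl))
          && PySem.Chars.endswith (cl.getD (k + j) [])
               ((fl.map (fun l => l.drop (pvCMin fl))).getD j []))
        = pvCheck (pvCMin ((cl.drop k).take fl.length)) (pvCMin fl)
            (cl.getD (k + j) []) (fl.getD j []) := by
    intro j hj
    have hjm : j < fl.length := List.mem_range.1 hj
    have hkj : k + j < cl.length := by omega
    rw [pv_getD_map pvKeyB fl j [] _ hjm, pv_getD_map pvKeyB cl (k + j) [] _ hkj,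
        pv_getD_map pvIndent fl j [] _ hjm, pv_getD_map pvIndent cl (k + j) [] _ hkj,
        pv_getD_map (fun l => l.drop (pvCMin fl)) fl j [] _ hjm,
        pvKeyB_fst]
    unfold pvCheck
    simp only [Int.ofNat_eq_natCast]
  rw [Bool.eq_iff_iff, List.all_eq_true, List.all_eq_true]
  constructor <;> intro h j hj
  · rw [← hpt j hj]
    exact h j hj
  · rw [hpt j hj]
    exact h j hj

theorem pv_anchors (cl : List (List Char)) (K : Bool × List Char) :
    (pvIndexB (cl.map pvKeyB)).getD K []
      = ((List.range cl.length).filter (fun k => pvKeyB (cl.getD k []) == K)).map Int.ofNat := by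
  unfold pvIndexB
  rw [pv_index_getD, PySem.List.enumerate_eq_map_pyRange _ (true, ([] : List Char)),
      List.filter_map, List.map_map]
  simp only [Function.comp_def, PySem.List.len_eq, List.length_map]
  rw [PySem.List.pyRange_zero_nat, List.filter_map, List.map_map]
  simp only [Function.comp_def, PySem.List.pyGetD_natCast]
  have hpred : ∀ k ∈ List.range cl.length,
      ((cl.map pvKeyB).getD k (true, ([] : List Char)) == K)
        = (pvKeyB (cl.getD k ([] : List Char)) == K) := by
    intro k hk
    rw [pv_getD_map pvKeyB cl k [] _ (List.mem_range.1 hk)]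
  rw [List.filter_congr hpred]
  apply List.map_congr_left
  intro k _
  rfl

theorem pv_main (content find : String) :
    indentation_flexible_replacer_py content find = indentation_flexible_replacer_py_alt content find := by
  have hclpv := splitOn_eq_pvSplit content.toList
  have hflpv := splitOn_eq_pvSplit find.toList
  set cl := PySem.Chars.splitOn content.toList ['\n'] with hcl
  set fl := PySem.Chars.splitOn find.toList ['\n'] with hfl
  have hflne : fl ≠ [] := by rw [hflpv]; exact pvSplit_ne_nil [] _
  have hclne : cl ≠ [] := by rw [hclpv]; exact pvSplit_ne_nil [] _
  have hm0 : 0 < fl.length := List.length_pos_of_ne_nil hflne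
  have hn0 : 0 < cl.length := List.length_pos_of_ne_nil hclne
  have hclnl : ∀ p ∈ cl, '\n' ∉ p := by
    rw [hclpv]; exact mem_pvSplit_no_nl [] content.toList (by simp)
  have hflnl : ∀ p ∈ fl, '\n' ∉ p := by
    rw [hflpv]; exact mem_pvSplit_no_nl [] find.toList (by simp)
  -- ===== A in filtered-range form =====
  have hA : indentation_flexible_replacer_py content find
      = ((PySem.List.pyRange 0 ((cl.length : Int) - (fl.length : Int) + 1) 1).filter
          (fun i => decide (pvRemoveIndentation (PySem.Chars.join ['\n']
              (PySem.List.slice cl (some i) (some (i + (fl.length : Int))))) = pvRemoveIndentation find.toList))).map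
          (fun i => String.ofList (PySem.Chars.join ['\n']
              (PySem.List.slice cl (some i) (some (i + (fl.length : Int)))))) := by
    unfold indentation_flexible_replacer_py
    rw [← hcl, ← hfl]
    exact (PySem.List.foldl_append_ite _ _ _ []).trans (by rw [List.nil_append])
  rw [pv_filter_range_window cl.length fl.length (by omega), List.filter_map, List.map_map,
      List.filter_filter] at hA
  -- ===== B in filtered-range form =====
  have hB : indentation_flexible_replacer_py_alt content find
      = ((pvIndexB (cl.map pvKeyB)).getD (PySem.List.pyGetD (fl.map pvKeyB) 0 (true, [])) []).foldl
          (fun acc i =>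
            if i + (fl.length : Int) > (cl.length : Int) then acc
            else if pvOkB cl fl i then acc ++ [pvEmitB cl fl.length i] else acc) [] := rfl
  have hK : PySem.List.pyGetD (fl.map pvKeyB) 0 (true, ([] : List Char)) = pvKeyB (fl.getD 0 []) := by
    rw [PySem.List.pyGetD_zero, pv_getD_map pvKeyB fl 0 [] _ hm0]
  rw [hB, hK, pv_anchors, List.foldl_map]
  have hbody : ∀ (acc : List String),
      ∀ k ∈ (List.range cl.length).filter (fun k => pvKeyB (cl.getD k []) == pvKeyB (fl.getD 0 [])),
      (fun acc i =>
          if i + (fl.length : Int) > (cl.length : Int) then acc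
          else if pvOkB cl fl i then acc ++ [pvEmitB cl fl.length i] else acc) acc (Int.ofNat k)
        = (fun acc k =>
            if (decide (k + fl.length ≤ cl.length) && pvOkB cl fl ((k : Nat) : Int)) then
              acc ++ [String.ofList (PySem.Chars.join ['\n'] ((cl.drop k).take fl.length))]
            else acc) acc k := by
    intro acc k _
    simp only [Int.ofNat_eq_natCast]
    by_cases hkm : k + fl.length ≤ cl.length
    · rw [if_neg (show ¬(((k : Nat) : Int) + (fl.length : Int) > (cl.length : Int)) by omega)]
      rw [pv_emitB_eq cl fl.length k hkm]
      simp only [hkm, decide_true, Bool.true_and]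
    · rw [if_pos (show ((k : Nat) : Int) + (fl.length : Int) > (cl.length : Int) by omega)]
      simp [hkm]
  rw [PySem.List.foldl_congr_mem _ _ _ _ hbody, PySem.List.foldl_append_if, List.nil_append,
      List.filter_filter]
  rw [hA]
  -- ===== pointwise equality of the filters and of the emitted blocks =====
  have hfe : (List.range cl.length).filter
        (fun a => ((fun i => decide (pvRemoveIndentation (PySem.Chars.join ['\n']
              (PySem.List.slice cl (some i) (some (i + (fl.length : Int))))) = pvRemoveIndentation find.toList))
            ∘ Int.ofNat) a && decide (a + fl.length ≤ cl.length))
      = (List.range cl.length).filter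
        (fun a => (decide (a + fl.length ≤ cl.length) && pvOkB cl fl ((a : Nat) : Int))
            && (pvKeyB (cl.getD a []) == pvKeyB (fl.getD 0 []))) := by
    apply List.filter_congr
    intro k hk
    have hkn : k < cl.length := List.mem_range.1 hk
    simp only [Function.comp_def, Int.ofNat_eq_natCast]
    by_cases hkm : k + fl.length ≤ cl.length
    · simp only [hkm, decide_true, Bool.and_true, Bool.true_and]
      rw [pv_okB_eq cl fl k hkm]
      have hwne : (cl.drop k).take fl.length ≠ [] := by
        have : ((cl.drop k).take fl.length).length = fl.length := by
          simp only [List.length_take, List.length_drop]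
          omega
        intro hnil
        rw [hnil] at this
        simp at this
        omega
      have hwnl : ∀ p ∈ (cl.drop k).take fl.length, '\n' ∉ p := by
        intro p hp
        exact hclnl p (((List.take_sublist _ _).trans (List.drop_sublist _ _)).subset hp)
      have hjw : PySem.Chars.splitOn (PySem.Chars.join ['\n'] ((cl.drop k).take fl.length)) ['\n']
          = (cl.drop k).take fl.length := by
        rw [splitOn_eq_pvSplit, pvSplit_join _ hwne hwnl]
      have hRA : pvRemoveIndentation (PySem.Chars.join ['\n'] ((cl.drop k).take fl.length))
          = PySem.Chars.join ['\n'] (((cl.drop k).take fl.length).map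
              (pvCut (pvCMin ((cl.drop k).take fl.length)))) := by
        rw [pvRemoveIndentation_eq, hjw]
      have hRF : pvRemoveIndentation find.toList
          = PySem.Chars.join ['\n'] (fl.map (pvCut (pvCMin fl))) := by
        rw [pvRemoveIndentation_eq, ← hfl]
      rw [Bool.eq_iff_iff, decide_eq_true_eq, PySem.List.slice_natCast_add cl k fl.length,
          hRA, hRF, pv_window_main cl fl k hm0 hkm hclnl hflnl]
      simp only [Bool.and_eq_true, List.all_eq_true, List.mem_range, beq_iff_eq]
      constructor
      · rintro ⟨h1, h2⟩
        exact ⟨h2, h1⟩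
      · rintro ⟨h1, h2⟩
        exact ⟨h2, h1⟩
    · simp [hkm]
  rw [hfe]
  apply List.map_congr_left
  intro k hk
  have hkm : k + fl.length ≤ cl.length := by
    have := (List.mem_filter.1 hk).2
    simp only [Bool.and_eq_true, decide_eq_true_eq] at this
    exact this.1.1
  simp only [Function.comp_def, Int.ofNat_eq_natCast]
  rw [PySem.List.slice_natCast_add cl k fl.length]

-- ===== VERDICT (by name: the statement is the Claim_ definition above) =====
theorem indentation_flexible_replacer_py_spec : Claim_equal_indentation_flexible_replacer_py := by
  intro content find _
  exact pv_main content find
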